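-- pv_equiv track=rewrite | github.com/wss8013/21Fall-MyPython-Homeworks | get_kth_digit.py | get_kth_digit
-- ===== SOURCE A (Python) =====
-- def get_kth_digit(n, k):
--     # convert negative n to positive by times -1
--     if n < 0:
--         n = -1 * n
--     while n >= 0 and k >= 0:
--         # get the 0th digit of n
--         x = n % 10
--         # move n to the right by 1 digit
--         n = n // 10
--         # update k value
--         k = k-1
--     return x
-- ===== SOURCE B (Python) =====
-- def get_kth_digit(n, k):
--     # Closed form for the k-th decimal digit (from the right, 0-based) of |n|.
--     return abs(n) // 10 ** k % 10
-- ===== Notes on version B (the rewrite author's own statement) =====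
-- stated objective: alternative
-- what changed: Replaces the digit-by-digit while loop with the closed form abs(n) // 10**k % 10.
import Mathlib
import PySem

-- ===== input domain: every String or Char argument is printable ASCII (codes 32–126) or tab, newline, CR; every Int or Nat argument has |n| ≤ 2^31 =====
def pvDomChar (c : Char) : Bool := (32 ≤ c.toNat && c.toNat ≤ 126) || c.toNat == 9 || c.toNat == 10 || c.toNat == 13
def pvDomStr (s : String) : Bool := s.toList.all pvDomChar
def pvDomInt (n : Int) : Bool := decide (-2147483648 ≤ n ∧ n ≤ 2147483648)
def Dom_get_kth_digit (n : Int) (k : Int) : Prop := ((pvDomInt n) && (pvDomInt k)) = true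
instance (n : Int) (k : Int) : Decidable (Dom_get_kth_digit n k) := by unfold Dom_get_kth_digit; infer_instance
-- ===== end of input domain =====

-- B replaces A's digit-by-digit while loop with the closed form abs(n) // 10**k % 10.
-- Pre_ excludes k < 0, where A raises UnboundLocalError (x is never assigned).


-- ===== PORT A =====
-- the while loop: state (n, k, x); each pass sets x := n % 10, n := n // 10, k := k - 1.
-- terminates because k strictly decreases while the guard requires 0 ≤ k.
def getKthLoop (n : Int) (k : Int) (x : Int) : Int :=
  if n ≥ 0 ∧ k ≥ 0 then
    getKthLoop (PySem.Int.floordiv n 10) (k - 1) (PySem.Int.mod n 10)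
  else x
termination_by (k + 1).toNat
decreasing_by omega

def get_kth_digit (n : Int) (k : Int) : Int :=
  let n' := if n < 0 then -1 * n else n
  -- x is unassigned before the loop in Python; Pre_ guarantees the loop runs, so 0 is never returned as the initial x
  getKthLoop n' k 0

-- ===== PORT B =====
def get_kth_digit_alt (n : Int) (k : Int) : Int :=
  PySem.Int.mod (PySem.Int.floordiv (Int.natAbs n) (10 ^ k.toNat)) 10

-- ===== PRECONDITION & SPEC =====
-- Pre_ excludes k < 0: there A's loop body never runs and `return x` raises UnboundLocalError.
def Pre_get_kth_digit (n : Int) (k : Int) : Prop := 0 ≤ k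
instance (n : Int) (k : Int) : Decidable (Pre_get_kth_digit n k) := by unfold Pre_get_kth_digit; infer_instance
def pvWitness_get_kth_digit : Int × Int := (-1234, 2)

def Spec_get_kth_digit (n : Int) (k : Int) (out : Int) : Prop := out = get_kth_digit_alt n k
instance (n : Int) (k : Int) (out : Int) : Decidable (Spec_get_kth_digit n k out) := by unfold Spec_get_kth_digit; infer_instance

-- ===== CLAIM (what is proved, stated in full; the proofs are below) =====
def Claim_equal_get_kth_digit : Prop := ∀ (n : Int) (k : Int), Dom_get_kth_digit n k → Pre_get_kth_digit n k → Spec_get_kth_digit n k (get_kth_digit n k)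

-- ===== LEMMAS AND PROOFS =====

-- loop invariant: for 0 ≤ n and k with k.toNat = m, the loop returns (n / 10^m) % 10 regardless of x
theorem getKthLoop_closed (m : Nat) : ∀ (n k x : Int), 0 ≤ n → 0 ≤ k → k.toNat = m →
    getKthLoop n k x = (n / (10 ^ m)) % 10 := by
  induction m with
  | zero =>
    intro n k x hn hk hm
    have hk0 : k = 0 := by omega
    subst hk0
    rw [getKthLoop, if_pos ⟨hn, le_refl 0⟩, getKthLoop, if_neg (by omega)]
    rw [PySem.Int.mod_eq_emod_of_pos (by norm_num)]
    simp
  | succ m ih =>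
    intro n k x hn hk hm
    rw [getKthLoop, if_pos ⟨hn, hk⟩]
    have hfd : PySem.Int.floordiv n 10 = n / 10 := PySem.Int.floordiv_eq_ediv_of_pos (by norm_num)
    rw [hfd, ih (n / 10) (k - 1) _ (Int.ediv_nonneg hn (by norm_num)) (by omega) (by omega)]
    rw [Int.ediv_ediv_of_nonneg (by norm_num : (0:Int) ≤ 10)]
    ring_nf

-- ===== VERDICT (by name: the statement is the Claim_ definition above) =====
theorem get_kth_digit_spec : Claim_equal_get_kth_digit := by
  intro n k _ hk
  unfold Spec_get_kth_digit get_kth_digit get_kth_digit_alt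
  have habs : (if n < 0 then -1 * n else n) = (Int.natAbs n : Int) := by
    rcases lt_or_ge n 0 with h | h
    · rw [if_pos h]; omega
    · rw [if_neg (by omega)]; omega
  rw [habs, getKthLoop_closed k.toNat _ k 0 (by positivity) hk rfl]
  rw [PySem.Int.floordiv_eq_ediv_of_pos (by positivity),
      PySem.Int.mod_eq_emod_of_pos (by norm_num)]
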